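-- pv_equiv track=rewrite | github.com/danilgarmaev/ar-flares | scripts/count_a3_sequence_sizes.py | count_split
-- ===== SOURCE A (Python) =====
-- from collections import Counter
--
-- SEQ_T = 16
--
-- def count_split(entries: list[tuple[int, int, int, str]], stride: int, label_mode: str) -> Counter:
--     offsets = list(range(-(SEQ_T - 1) * stride, 1, stride))
--     counts: Counter = Counter()
--     n = len(entries)
--     for i in range(0, n, stride):
--         ar0, label_c, label_m, subtype = entries[i]
--         ok = True
--         for off in offsets:
--             j = i + off
--             if j < 0 or j >= n or entries[j][0] != ar0:
--                 ok = False
--                 break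
--         if not ok:
--             continue
--         label = label_c if label_mode == "C" else label_m
--         counts["raw"] += 1
--         if label == 1:
--             counts["pos"] += 1
--         else:
--             counts["neg_total"] += 1
--             counts[f"neg_{subtype}"] += 1
--     return counts
-- ===== SOURCE B (Python) =====
-- from collections import Counter
--
-- SEQ_T = 16
--
-- def count_split(entries: list[tuple[int, int, int, str]], stride: int, label_mode: str) -> Counter:
--     # Single forward pass over the strided grid keeping a run-length of equal
--     # consecutive AR values, instead of re-scanning all 16 offsets per position.
--     counts: Counter = Counter()
--     run = 0
--     prev = None
--     for i in range(0, len(entries), stride):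
--         ar0, label_c, label_m, subtype = entries[i]
--         run = run + 1 if prev == ar0 else 1
--         prev = ar0
--         if run >= SEQ_T:
--             label = label_c if label_mode == "C" else label_m
--             counts["raw"] += 1
--             if label == 1:
--                 counts["pos"] += 1
--             else:
--                 counts["neg_total"] += 1
--                 counts[f"neg_{subtype}"] += 1
--     return counts
-- ===== Notes on version B (the rewrite author's own statement) =====
-- stated objective: faster
-- what changed: B replaces A's inner 16-offset re-scan at every grid position by a single forward pass that maintains a run-length of consecutive equal AR values over the strided grid, incrementing the same counters when the run reaches SEQ_T.
import Mathlib
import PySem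

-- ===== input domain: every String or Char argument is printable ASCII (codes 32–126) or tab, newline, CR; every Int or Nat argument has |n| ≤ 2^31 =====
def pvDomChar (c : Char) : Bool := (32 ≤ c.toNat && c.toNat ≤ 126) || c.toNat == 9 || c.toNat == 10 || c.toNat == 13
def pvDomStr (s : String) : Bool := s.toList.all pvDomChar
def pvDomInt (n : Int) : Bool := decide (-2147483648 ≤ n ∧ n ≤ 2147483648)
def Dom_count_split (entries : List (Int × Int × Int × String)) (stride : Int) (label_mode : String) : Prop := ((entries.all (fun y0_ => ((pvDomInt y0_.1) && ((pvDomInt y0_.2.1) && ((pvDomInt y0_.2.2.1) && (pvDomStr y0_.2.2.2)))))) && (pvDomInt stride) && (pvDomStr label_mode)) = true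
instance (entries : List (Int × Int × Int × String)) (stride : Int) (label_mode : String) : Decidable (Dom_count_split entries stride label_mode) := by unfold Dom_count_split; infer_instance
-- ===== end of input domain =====

-- B replaces A's inner 16-offset re-scan per grid position by one forward pass
-- keeping a run-length of consecutive equal AR values on the strided grid (objective: faster, constant factor).

-- ===== PORT A =====
-- the inner 'for off in offsets: … ok = False; break' loop of A
def csOk (entries : List (Int × Int × Int × String)) (n ar0 i : Int) : List Int → Bool
  | [] => true
  | off :: rest =>
    let j := i + off
    if j < 0 || n ≤ j || ((PySem.List.pyGet? entries j).map (fun e => e.1) != some ar0) then false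
    else csOk entries n ar0 i rest

-- the body of A's outer loop
def csStepA (entries : List (Int × Int × Int × String)) (n : Int) (offsets : List Int)
    (label_mode : String) (counts : PySem.Dict String Int) (i : Int) : PySem.Dict String Int :=
  match PySem.List.pyGet? entries i with
  | none => counts  -- unreachable: every i of range(0, n, stride) is a valid index
  | some (ar0, label_c, label_m, subtype) =>
    if csOk entries n ar0 i offsets then
      let label := if label_mode == "C" then label_c else label_m
      let counts := counts.insert "raw" (counts.getD "raw" 0 + 1)
      if label == 1 then counts.insert "pos" (counts.getD "pos" 0 + 1)
      else
        let counts := counts.insert "neg_total" (counts.getD "neg_total" 0 + 1)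
        counts.insert ("neg_" ++ subtype) (counts.getD ("neg_" ++ subtype) 0 + 1)
    else counts

def count_split (entries : List (Int × Int × Int × String)) (stride : Int) (label_mode : String) : List (String × Int) :=
  let offsets := PySem.List.pyRange (-(16 - 1) * stride) 1 stride
  let n : Int := entries.length
  ((PySem.List.pyRange 0 n stride).foldl (csStepA entries n offsets label_mode) PySem.Dict.empty).items

-- ===== PORT B =====
-- the body of B's single pass: state (counts, run, prev)
def csStepB (entries : List (Int × Int × Int × String)) (label_mode : String)
    (st : PySem.Dict String Int × Int × Option Int) (i : Int) : PySem.Dict String Int × Int × Option Int :=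
  match PySem.List.pyGet? entries i with
  | none => st  -- unreachable: every i of range(0, n, stride) is a valid index
  | some (ar0, label_c, label_m, subtype) =>
    let counts := st.1
    let run : Int := if st.2.2 == some ar0 then st.2.1 + 1 else 1
    let prev : Option Int := some ar0
    if 16 ≤ run then
      let label := if label_mode == "C" then label_c else label_m
      let counts := counts.insert "raw" (counts.getD "raw" 0 + 1)
      if label == 1 then (counts.insert "pos" (counts.getD "pos" 0 + 1), run, prev)
      else
        let counts := counts.insert "neg_total" (counts.getD "neg_total" 0 + 1)
        (counts.insert ("neg_" ++ subtype) (counts.getD ("neg_" ++ subtype) 0 + 1), run, prev)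
    else (counts, run, prev)

def count_split_alt (entries : List (Int × Int × Int × String)) (stride : Int) (label_mode : String) : List (String × Int) :=
  let n : Int := entries.length
  ((PySem.List.pyRange 0 n stride).foldl (csStepB entries label_mode) (PySem.Dict.empty, 0, none)).1.items

-- ===== PRECONDITION & SPEC =====
-- Pre_ excludes only stride = 0, on which Python's range(0, n, 0) raises ValueError (in A and in B alike).
def Pre_count_split (entries : List (Int × Int × Int × String)) (stride : Int) (label_mode : String) : Prop := stride ≠ 0
instance (entries : List (Int × Int × Int × String)) (stride : Int) (label_mode : String) : Decidable (Pre_count_split entries stride label_mode) := by unfold Pre_count_split; infer_instance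

def pvWitness_count_split : (List (Int × Int × Int × String)) × Int × String := ([(5, 1, 0, "B"), (5, 0, 1, "C")], 1, "C")

def Spec_count_split (entries : List (Int × Int × Int × String)) (stride : Int) (label_mode : String) (out : List (String × Int)) : Prop := out = count_split_alt entries stride label_mode
instance (entries : List (Int × Int × Int × String)) (stride : Int) (label_mode : String) (out : List (String × Int)) : Decidable (Spec_count_split entries stride label_mode out) := by unfold Spec_count_split; infer_instance

-- ===== CLAIM (what is proved, stated in full; the proofs are below) =====
def Claim_equal_count_split : Prop := ∀ (entries : List (Int × Int × Int × String)) (stride : Int) (label_mode : String), Dom_count_split entries stride label_mode → Pre_count_split entries stride label_mode → Spec_count_split entries stride label_mode (count_split entries stride label_mode)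

-- ===== LEMMAS AND PROOFS =====

-- empty grid for a negative stride
theorem csRange_neg (n s : Int) (h : s < 0) (hn : 0 ≤ n) : PySem.List.pyRange 0 n s = [] := by
  simp [PySem.List.pyRange]
  split_ifs <;> omega

-- the entry at grid position k (k-th multiple of the stride)
def csAr (entries : List (Int × Int × Int × String)) (S : Int) (k : Nat) : Int × Int × Int × String :=
  entries.getD (S * k).toNat default

-- the run length B maintains, as a function of the grid position count
def csC (ar : Nat → Int) : Nat → Int
  | 0 => 0
  | 1 => 1
  | (m+2) => if ar m = ar (m+1) then csC ar (m+1) + 1 else 1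

theorem csC_pos (ar : Nat → Int) (m : Nat) : 1 ≤ csC ar (m+1) := by
  cases m with
  | zero => simp [csC]
  | succ m' =>
    rw [csC]
    split_ifs with h
    · have := csC_pos ar m'
      omega
    · omega

theorem csC_iff (ar : Nat → Int) (m t : Nat) :
    ((t : Int) + 1 ≤ csC ar (m+1)) ↔ (∀ k : Nat, k < t+1 → k ≤ m ∧ ar (m - k) = ar m) := by
  induction m generalizing t with
  | zero =>
    simp only [csC]
    constructor
    · intro h k hk
      have ht : t = 0 := by omega
      subst ht
      have hk0 : k = 0 := by omega
      subst hk0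
      simp
    · intro h
      have h1 := h t (by omega)
      have ht : t = 0 := by omega
      subst ht
      omega
  | succ m ih =>
    rw [csC]
    split_ifs with hE
    · constructor
      · intro h k hk
        cases k with
        | zero => simp
        | succ k' =>
          cases t with
          | zero => omega
          | succ t' =>
            obtain ⟨hk'le, hk'eq⟩ := (ih t').mp (by push_cast at h ⊢; omega) k' (by omega)
            refine ⟨by omega, ?_⟩
            have h2 : m + 1 - (k' + 1) = m - k' := by omega
            rw [h2, hk'eq, hE]
      · intro h
        cases t with
        | zero =>
          have := csC_pos ar m
          push_cast
          omega
        | succ t' =>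
          have hm : ((t' : Int) + 1 ≤ csC ar (m+1)) := by
            rw [ih t']
            intro k' hk'
            obtain ⟨hle, heq⟩ := h (k'+1) (by omega)
            refine ⟨by omega, ?_⟩
            have h2 : m + 1 - (k' + 1) = m - k' := by omega
            rw [h2] at heq
            rw [heq, hE]
          push_cast
          push_cast at hm
          omega
    · constructor
      · intro h k hk
        have ht : t = 0 := by omega
        subst ht
        have hk0 : k = 0 := by omega
        subst hk0
        simp
      · intro h
        cases t with
        | zero => norm_num
        | succ t' =>
          exfalso
          obtain ⟨_, heq⟩ := h 1 (by omega)
          simp at heq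
          exact hE heq

-- pyGet? at a valid nonnegative index
theorem csGet (xs : List (Int × Int × Int × String)) (j : Int) (h0 : 0 ≤ j) (h1 : j < xs.length) :
    PySem.List.pyGet? xs j = some (xs.getD j.toNat default) := by
  obtain ⟨k, rfl⟩ : ∃ k : Nat, j = (k : Int) := ⟨j.toNat, by omega⟩
  rw [PySem.List.pyGet?_natCast]
  have hk : k < xs.length := by omega
  rw [List.getElem?_eq_getElem hk, List.getD_eq_getElem?_getD, List.getElem?_eq_getElem (by simpa using hk)]
  simp

theorem csGetGrid (entries : List (Int × Int × Int × String)) (S : Int) (hS : 0 < S) (k : Nat)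
    (hk : (S * k : Int) < entries.length) :
    PySem.List.pyGet? entries (S * k) = some (csAr entries S k) := by
  have h0 : (0 : Int) ≤ S * k := by positivity
  rw [csGet entries _ h0 hk]
  rfl

-- A's inner loop succeeds iff every offset passes all three checks
theorem csOk_iff (entries : List (Int × Int × Int × String)) (n a i : Int) (offs : List Int) :
    csOk entries n a i offs = true ↔
      ∀ off ∈ offs, 0 ≤ i + off ∧ i + off < n ∧
        (PySem.List.pyGet? entries (i + off)).map (fun e => e.1) = some a := by
  induction offs with
  | nil => simp [csOk]
  | cons o rest ih =>
    simp only [csOk]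
    split_ifs with hc
    · simp only [Bool.or_eq_true, decide_eq_true_eq, bne_iff_ne, ne_eq] at hc
      simp only [false_iff, List.forall_mem_cons, not_and]
      intro h1
      obtain ⟨ha, hb, hd⟩ := h1
      intro _
      rcases hc with (h | h) | h
      · omega
      · omega
      · exact h hd
    · simp only [Bool.or_eq_true, decide_eq_true_eq, bne_iff_ne, ne_eq, not_or, not_lt, not_le, not_not] at hc
      rw [ih, List.forall_mem_cons]
      obtain ⟨⟨h1, h2⟩, h3⟩ := hc
      constructor
      · intro hr
        exact ⟨⟨by omega, by omega, h3⟩, hr⟩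
      · intro h
        exact h.2

-- the 16 offsets, explicitly
theorem csOffsets (S : Int) (hS : 0 < S) :
    PySem.List.pyRange (-(16 - 1) * S) 1 S = (List.range 16).map (fun t : Nat => -(16 - 1) * S + S * (t : Int)) := by
  have h15 : (15 : Int) ≤ 15 * S := by nlinarith
  have h1 : (-(16 - 1) * S : Int) < 1 := by nlinarith
  have h2 : (1 - -(16 - 1) * S + S - 1 : Int) = 16 * S := by ring
  rw [PySem.List.pyRange_of_pos _ _ hS, if_pos h1, h2,
    Int.mul_ediv_cancel _ (by omega : S ≠ 0)]
  rfl

-- A's window test at grid position m equals "the run length reaches 16"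
theorem csOk_eq (entries : List (Int × Int × Int × String)) (S : Int) (hS : 0 < S) (m : Nat)
    (hmn : (S * m : Int) < entries.length) :
    csOk entries entries.length ((csAr entries S m).1) (S * m) (PySem.List.pyRange (-(16 - 1) * S) 1 S)
      = decide (16 ≤ csC (fun k => (csAr entries S k).1) (m + 1)) := by
  have hble : ∀ k : Nat, (S * ((m - k : Nat) : Int)) < entries.length := by
    intro k
    exact lt_of_le_of_lt
      (mul_le_mul_of_nonneg_left (by exact_mod_cast Nat.sub_le m k) hS.le) hmn
  have h16 := csC_iff (fun k => (csAr entries S k).1) m 15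
  norm_num at h16
  rw [Bool.eq_iff_iff, csOk_iff, decide_eq_true_eq, csOffsets S hS, h16]
  constructor
  · intro H k hk
    have hmem : (-(16 - 1) * S + S * ((15 - k : Nat) : Int)) ∈
        (List.range 16).map (fun t : Nat => -(16 - 1) * S + S * (t : Int)) :=
      List.mem_map.mpr ⟨15 - k, List.mem_range.mpr (by omega), rfl⟩
    obtain ⟨hge, hlt, hmap⟩ := H _ hmem
    have hkm : k ≤ m := by
      by_contra hknm
      have c1 : ((15 - k : Nat) : Int) = 15 - (k : Int) := by omega
      have he : (S * (m : Int) + (-(16 - 1) * S + S * ((15 - k : Nat) : Int)) : Int)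
          = S * ((m : Int) - k) := by rw [c1]; ring
      rw [he] at hge
      have := (mul_nonneg_iff_of_pos_left hS).mp hge
      omega
    refine ⟨hkm, ?_⟩
    have c1 : ((15 - k : Nat) : Int) = 15 - (k : Int) := by omega
    have c2 : ((m - k : Nat) : Int) = (m : Int) - k := by omega
    have hidx : (S * (m : Int) + (-(16 - 1) * S + S * ((15 - k : Nat) : Int)) : Int)
        = S * ((m - k : Nat) : Int) := by rw [c1, c2]; ring
    rw [hidx, csGetGrid entries S hS _ (hble k)] at hmap
    simpa using hmap
  · intro H off hoff
    obtain ⟨t, htm, rfl⟩ := List.mem_map.mp hoff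
    have ht16 : t < 16 := List.mem_range.mp htm
    obtain ⟨hkm, heq⟩ := H (15 - t) (by omega)
    have c2 : ((m - (15 - t) : Nat) : Int) = (m : Int) - ((15 : Int) - (t : Int)) := by omega
    have hidx : (S * (m : Int) + (-(16 - 1) * S + S * (t : Int)) : Int)
        = S * ((m - (15 - t) : Nat) : Int) := by rw [c2]; ring
    refine ⟨?_, ?_, ?_⟩
    · rw [hidx]; positivity
    · rw [hidx]; exact hble (15 - t)
    · rw [hidx, csGetGrid entries S hS _ (hble (15 - t))]
      simpa using heq

-- one step of A and one step of B, related
theorem csStep_rel (entries : List (Int × Int × Int × String)) (S : Int) (hS : 0 < S)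
    (label_mode : String) (m : Nat) (hmn : (S * m : Int) < entries.length)
    (ca : PySem.Dict String Int) (st : PySem.Dict String Int × Int × Option Int)
    (h1 : st.1 = ca) (h2 : st.2.1 = csC (fun k => (csAr entries S k).1) m)
    (h3 : st.2.2 = if m = 0 then none else some ((csAr entries S (m - 1)).1)) :
    (csStepB entries label_mode st (S * m)).1
        = csStepA entries entries.length (PySem.List.pyRange (-(16 - 1) * S) 1 S) label_mode ca (S * m)
    ∧ (csStepB entries label_mode st (S * m)).2.1 = csC (fun k => (csAr entries S k).1) (m + 1)
    ∧ (csStepB entries label_mode st (S * m)).2.2 = some ((csAr entries S m).1) := by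
  obtain ⟨cb, run, prev⟩ := st
  dsimp only at h1 h2 h3
  subst h1
  rcases hA : csAr entries S m with ⟨a1, a2, a3, a4⟩
  have hok : csOk entries entries.length a1 (S * m) (PySem.List.pyRange (-(16 - 1) * S) 1 S)
      = decide (16 ≤ csC (fun k => (csAr entries S k).1) (m + 1)) := by
    simpa [hA] using csOk_eq entries S hS m hmn
  have hrun : (if (prev == some a1) then run + 1 else 1)
      = csC (fun k => (csAr entries S k).1) (m + 1) := by
    cases m with
    | zero =>
      rw [if_pos rfl] at h3
      subst h3
      simp [csC]
    | succ m' =>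
      rw [if_neg (by omega : ¬ (m' + 1 = 0)), Nat.add_sub_cancel] at h3
      subst h3
      have ha1 : a1 = (csAr entries S (m' + 1)).1 := by rw [hA]
      by_cases hc : (csAr entries S m').1 = a1
      · rw [if_pos (by simp [hc]), csC, if_pos (hc.trans ha1), h2]
      · rw [if_neg (by simp [hc]), csC, if_neg (fun hE => hc (hE.trans ha1.symm))]
  simp only [csStepA, csStepB, csGetGrid entries S hS m hmn, hA, hok, hrun]
  by_cases h16 : (16 : Int) ≤ csC (fun k => (csAr entries S k).1) (m + 1)
  · rw [if_pos (by simp [h16] : decide (16 ≤ csC (fun k => (csAr entries S k).1) (m + 1)) = true),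
      if_pos h16]
    refine ⟨?_, ?_, ?_⟩ <;> split_ifs <;> rfl
  · rw [if_neg (by simp [h16] : ¬ decide (16 ≤ csC (fun k => (csAr entries S k).1) (m + 1)) = true),
      if_neg h16]
    exact ⟨rfl, rfl, rfl⟩

-- the loop invariant: B's state after m grid positions vs A's counter
theorem csInv (entries : List (Int × Int × Int × String)) (S : Int) (hS : 0 < S)
    (label_mode : String) (M : Nat)
    (hM : ∀ k : Nat, k < M → (S * k : Int) < entries.length) (m : Nat) (hm : m ≤ M) :
    (((List.range m).map (fun k : Nat => (S : Int) * (k : Int))).foldl (csStepB entries label_mode)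
        (PySem.Dict.empty, 0, none)).1
      = ((List.range m).map (fun k : Nat => (S : Int) * (k : Int))).foldl
          (csStepA entries entries.length (PySem.List.pyRange (-(16 - 1) * S) 1 S) label_mode)
          PySem.Dict.empty
    ∧ (((List.range m).map (fun k : Nat => (S : Int) * (k : Int))).foldl (csStepB entries label_mode)
        (PySem.Dict.empty, 0, none)).2.1 = csC (fun k => (csAr entries S k).1) m
    ∧ (((List.range m).map (fun k : Nat => (S : Int) * (k : Int))).foldl (csStepB entries label_mode)
        (PySem.Dict.empty, 0, none)).2.2
      = (if m = 0 then none else some ((csAr entries S (m - 1)).1)) := by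
  induction m with
  | zero => exact ⟨rfl, rfl, rfl⟩
  | succ m ih =>
    obtain ⟨ih1, ih2, ih3⟩ := ih (by omega)
    simp only [List.range_succ, List.map_append, List.map_cons, List.map_nil, List.foldl_append, List.foldl_cons, List.foldl_nil]
    obtain ⟨g1, g2, g3⟩ := csStep_rel entries S hS label_mode m (hM m (by omega)) _ _ ih1 ih2 ih3
    refine ⟨g1, g2, ?_⟩
    rw [g3]
    simp

-- ===== VERDICT (by name: the statement is the Claim_ definition above) =====
theorem count_split_spec : Claim_equal_count_split := by
  intro entries stride label_mode _hDom hPre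
  unfold Spec_count_split
  rcases lt_trichotomy stride 0 with hneg | hz | hpos
  · simp only [count_split, count_split_alt]
    rw [csRange_neg _ _ hneg (by positivity)]
    rfl
  · exact absurd hz hPre
  · simp only [count_split, count_split_alt]
    rw [PySem.List.pyRange_of_pos 0 _ hpos]
    simp only [zero_add]
    by_cases hn : (0 : Int) < (entries.length : Int)
    · rw [if_pos hn]
      have hM : ∀ k : Nat, k < ((↑entries.length - 0 + stride - 1) / stride).toNat →
          (stride * (k : Int)) < entries.length := by
        intro k hk
        have hki : (k : Int) + 1 ≤ (↑entries.length - 0 + stride - 1) / stride := by omega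
        have h2 := (Int.le_ediv_iff_mul_le hpos).mp hki
        nlinarith
      obtain ⟨h1, -, -⟩ := csInv entries stride hpos label_mode _ hM _ le_rfl
      rw [h1]
    · rw [if_neg hn]
      obtain ⟨h1, -, -⟩ := csInv entries stride hpos label_mode 0 (by omega) 0 le_rfl
      rw [h1]
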